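-- pv_equiv track=rewrite | github.com/yashs21/EE604 | Image-Processing-Course-Assignment-main/Assignment 1/Q1/es0208.py | create_linear_system
-- ===== SOURCE A (Python) =====
-- def create_linear_system(N, h):
--     A = [[0] * (N - 1) for _ in range(N - 1)]
--     b = [0] * (N - 1)
--
--     for i in range(1, N):
--         A[i - 1][i - 1] = -2
--         b[i - 1] = -h[i - 1] + h[i + 1]
--
--     for i in range(1, N - 1):
--         A[i][i - 1] = 1
--         A[i - 1][i] = 1
--
--     return A, b
-- ===== SOURCE B (Python) =====
-- def create_linear_system(N, h):
--     m = max(N - 1, 0)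
--     # one shared stencil [..0,1,-2,1,0..]; each row is a sliding-window slice of it
--     tmpl = [0] * m + [1, -2, 1] + [0] * m
--     A = [tmpl[m + 1 - i : 2 * m + 1 - i] for i in range(m)]
--     b = [right - left for left, right in zip(h[:m], h[2 : m + 2])]
--     return A, b
-- ===== Notes on version B (the rewrite author's own statement) =====
-- stated objective: alternative
-- what changed: Builds every matrix row as a sliding-window slice of one shared stencil list [0..,1,-2,1,..0] instead of allocating a zero matrix and mutating its three diagonals, and builds b by zipping h with its shift-by-2 slice instead of indexed assignment.
import Mathlib
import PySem

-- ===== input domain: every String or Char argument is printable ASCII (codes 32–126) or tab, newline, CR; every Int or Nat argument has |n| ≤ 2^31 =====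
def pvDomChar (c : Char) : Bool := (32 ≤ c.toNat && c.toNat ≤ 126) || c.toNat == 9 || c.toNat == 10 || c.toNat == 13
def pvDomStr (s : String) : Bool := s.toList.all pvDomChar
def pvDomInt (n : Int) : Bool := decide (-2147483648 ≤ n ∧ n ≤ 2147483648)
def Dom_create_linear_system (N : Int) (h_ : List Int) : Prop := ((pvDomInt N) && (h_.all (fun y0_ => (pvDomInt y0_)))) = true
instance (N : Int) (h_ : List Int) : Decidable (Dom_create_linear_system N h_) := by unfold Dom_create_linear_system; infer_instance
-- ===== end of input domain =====

-- B builds each matrix row as a sliding-window slice of one shared stencil list and b by zipping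
-- h with its shift-by-2 slice, instead of A's zero allocation plus diagonal-mutation loops; objective: alternative.

-- ===== PORT A =====
-- literal port of A: allocate zero matrix and b, then mutate along the diagonals;
-- h reads use pyGetD, exact under Pre_ (Python raises IndexError outside it).
def create_linear_system (N : Int) (h_ : List Int) : List (List Int) × List Int :=
  let A0 : List (List Int) :=
    (PySem.List.pyRange 0 (N - 1) 1).map (fun _ => List.replicate (N - 1).toNat (0 : Int))
  let b0 : List Int := List.replicate (N - 1).toNat (0 : Int)
  let s1 :=
    (PySem.List.pyRange 1 N 1).foldl
      (fun (st : List (List Int) × List Int) i =>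
        (PySem.List.pySetD st.1 (i - 1)
           (PySem.List.pySetD (PySem.List.pyGetD st.1 (i - 1) []) (i - 1) (-2)),
         PySem.List.pySetD st.2 (i - 1)
           (-(PySem.List.pyGetD h_ (i - 1) 0) + PySem.List.pyGetD h_ (i + 1) 0)))
      (A0, b0)
  let A2 :=
    (PySem.List.pyRange 1 (N - 1) 1).foldl
      (fun A i =>
        let A' := PySem.List.pySetD A i
          (PySem.List.pySetD (PySem.List.pyGetD A i []) (i - 1) 1)
        PySem.List.pySetD A' (i - 1)
          (PySem.List.pySetD (PySem.List.pyGetD A' (i - 1) []) i 1))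
      s1.1
  (A2, s1.2)

-- ===== PORT B =====
-- literal port of Source B: one stencil list, rows are slices of it, b is a zip of two slices of h.
def create_linear_system_alt (N : Int) (h_ : List Int) : List (List Int) × List Int :=
  let m : Int := max (N - 1) 0
  let tmpl : List Int := List.replicate m.toNat 0 ++ [1, -2, 1] ++ List.replicate m.toNat 0
  ((PySem.List.pyRange 0 m 1).map (fun i =>
     PySem.List.slice tmpl (some (m + 1 - i)) (some (2 * m + 1 - i))),
   ((PySem.List.slice h_ none (some m)).zip
      (PySem.List.slice h_ (some 2) (some (m + 2)))).map (fun p => p.2 - p.1))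

-- ===== PRECONDITION & SPEC =====
-- Pre_ excludes exactly the inputs where Python A raises IndexError reading h (N ≥ 2 with len(h) < N+1).
def Pre_create_linear_system (N : Int) (h_ : List Int) : Prop :=
  N ≤ 1 ∨ N + 1 ≤ (h_.length : Int)
instance (N : Int) (h_ : List Int) : Decidable (Pre_create_linear_system N h_) := by
  unfold Pre_create_linear_system; infer_instance

def pvWitness_create_linear_system : Int × List Int := (4, [1, 2, 3, 4, 5])

def Spec_create_linear_system (N : Int) (h_ : List Int) (out : List (List Int) × List Int) : Prop := out = create_linear_system_alt N h_
instance (N : Int) (h_ : List Int) (out : List (List Int) × List Int) : Decidable (Spec_create_linear_system N h_ out) := by unfold Spec_create_linear_system; infer_instance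

-- ===== CLAIM (what is proved, stated in full; the proofs are below) =====
def Claim_equal_create_linear_system : Prop := ∀ (N : Int) (h_ : List Int), Dom_create_linear_system N h_ → Pre_create_linear_system N h_ → Spec_create_linear_system N h_ (create_linear_system N h_)

-- ===== LEMMAS AND PROOFS =====

-- canonical row shapes reached by A's mutation loops
def Drow (n r : Nat) : List Int := (List.replicate n (0 : Int)).set r (-2)
def Hrow (n t : Nat) : List Int := if t = 0 then Drow n 0 else (Drow n t).set (t - 1) 1
def Grow (n t : Nat) : List Int := (Hrow n t).set (t + 1) 1
-- the stencil and B's rows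
def Tmpl (n : Nat) : List Int := List.replicate n (0 : Int) ++ [1, -2, 1] ++ List.replicate n (0 : Int)
def Srow (n i : Nat) : List Int := ((Tmpl n).drop (n + 1 - i)).take n

theorem pv_len_Drow (n r : Nat) : (Drow n r).length = n := by simp [Drow]
theorem pv_len_Hrow (n t : Nat) : (Hrow n t).length = n := by
  unfold Hrow; split <;> simp [pv_len_Drow]
theorem pv_len_Grow (n t : Nat) : (Grow n t).length = n := by simp [Grow, pv_len_Hrow]
theorem pv_len_Tmpl (n : Nat) : (Tmpl n).length = 2 * n + 3 := by simp [Tmpl]; omega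
theorem pv_len_Srow (n i : Nat) (hi : i < n) : (Srow n i).length = n := by
  simp [Srow, pv_len_Tmpl]; omega

theorem pv_Tmpl_get (n t : Nat) (ht : t < 2 * n + 3) :
    (Tmpl n)[t]'(by rw [pv_len_Tmpl]; exact ht) =
      if t < n then 0 else if t = n then 1 else if t = n + 1 then -2
      else if t = n + 2 then 1 else 0 := by
  unfold Tmpl
  rw [List.getElem_append]
  split
  · rename_i hout
    simp only [List.length_append, List.length_replicate, List.length_cons,
      List.length_nil] at hout
    rw [List.getElem_append]
    split
    · rename_i hlt
      simp only [List.length_replicate] at hlt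
      simp [hlt]
    · rename_i hge
      simp only [List.length_replicate] at hge ⊢
      have h1 : ¬ t < n := by omega
      rcases Nat.lt_or_ge (t - n) 1 with h | h
      · have e0 : t = n := by omega
        simp [e0]
      · rcases Nat.lt_or_ge (t - n) 2 with h2 | h2
        · have e0 : t = n + 1 := by omega
          simp [e0]
        · have e0 : t = n + 2 := by omega
          simp [e0]
  · rename_i hge
    simp only [List.length_append, List.length_replicate, List.length_cons,
      List.length_nil] at hge ⊢
    have h1 : ¬ t < n := by omega
    have h2 : ¬ t = n := by omega
    have h3 : ¬ t = n + 1 := by omega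
    have h4 : ¬ t = n + 2 := by omega
    simp [h1, h2, h3, h4]

theorem pv_foldl_pair {α β ι : Type} (f : α → ι → α) (g : β → ι → β) :
    ∀ (l : List ι) (a : α) (b : β),
      l.foldl (fun st x => (f st.1 x, g st.2 x)) (a, b) = (l.foldl f a, l.foldl g b) := by
  intro l
  induction l with
  | nil => intro a b; rfl
  | cons x xs ih => intro a b; simp only [List.foldl_cons]; exact ih (f a x) (g b x)

theorem pv_getD_map_range {α : Type} (f : Nat → α) (n k : Nat) (d : α) (hk : k < n) :
    ((List.range n).map f).getD k d = f k := by
  simp [List.getD, hk]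

theorem pv_set_map_range {α : Type} (f : Nat → α) (n k : Nat) (v : α) :
    ((List.range n).map f).set k v = (List.range n).map fun r => if r = k then v else f r := by
  apply List.ext_getElem
  · simp
  · intro i h1 h2
    simp only [List.getElem_set, List.getElem_map, List.getElem_range]
    by_cases h : i = k
    · simp [h]
    · have h' : ¬ (k = i) := fun hk => h hk.symm
      simp [h, h']

theorem pv_map_range_congr {α : Type} {f g : Nat → α} (n : Nat)
    (h : ∀ k, k < n → f k = g k) : (List.range n).map f = (List.range n).map g := by
  apply List.map_congr_left
  intro a ha
  exact h a (List.mem_range.mp ha)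

-- loop 1: each index of the initial map is overwritten once, in increasing order
theorem pv_foldl_set_self {α : Type} (u : Nat → α → α) (f0 : Nat → α) (d : α) :
    ∀ (t n : Nat), t ≤ n →
      (List.range t).foldl (fun M k => M.set k (u k (M.getD k d))) ((List.range n).map f0)
        = (List.range n).map (fun r => if r < t then u r (f0 r) else f0 r) := by
  intro t
  induction t with
  | zero =>
    intro n _
    simp only [List.range_zero, List.foldl_nil]
    exact (pv_map_range_congr n (fun k _ => by simp)).symm
  | succ t ih =>
    intro n ht
    rw [List.range_succ, List.foldl_append, ih n (by omega)]
    simp only [List.foldl_cons, List.foldl_nil]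
    rw [pv_getD_map_range _ n t d (by omega), pv_set_map_range]
    apply pv_map_range_congr
    intro k hk
    by_cases hkt : k = t
    · subst hkt; simp
    · have h1 : (k < t + 1) ↔ (k < t) := by omega
      simp only [if_neg hkt, h1]

theorem pv_foldl_set_const {α : Type} (c : Nat → α) (d : α) (n : Nat) :
    (List.range n).foldl (fun b k => b.set k (c k)) (List.replicate n d)
      = (List.range n).map (fun r => if r < n then c r else d) := by
  have h0 : (List.replicate n d) = (List.range n).map (fun _ => d) := by
    apply List.ext_getElem <;> simp
  rw [h0]
  have h := pv_foldl_set_self (fun k _ => c k) (fun _ => d) d n n le_rfl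
  simp only [] at h
  exact h

-- loop 2: iteration k patches row k+1 at column k and row k at column k+1
theorem pv_loop2 (n : Nat) :
    ∀ t, t + 1 ≤ n →
      (List.range t).foldl
        (fun M k =>
          (M.set (k+1) ((M.getD (k+1) []).set k 1)).set k
            (((M.set (k+1) ((M.getD (k+1) []).set k 1)).getD k []).set (k+1) 1))
        ((List.range n).map (fun r => Drow n r))
      = (List.range n).map (fun r =>
          if r < t then Grow n r else if r = t then Hrow n r else Drow n r) := by
  intro t
  induction t with
  | zero =>
    intro _
    simp only [List.range_zero, List.foldl_nil]
    apply pv_map_range_congr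
    intro k hk
    by_cases hk0 : k = 0 <;> simp [hk0, Hrow]
  | succ t ih =>
    intro ht
    rw [List.range_succ, List.foldl_append, ih (by omega)]
    simp only [List.foldl_cons, List.foldl_nil]
    rw [pv_getD_map_range _ n (t+1) [] (by omega)]
    have e1 : ¬ (t + 1 < t) := by omega
    have e2 : ¬ (t + 1 = t) := by omega
    rw [if_neg e1, if_neg e2, pv_set_map_range, pv_getD_map_range _ n t [] (by omega)]
    have e3 : ¬ (t = t + 1) := by omega
    have e4 : ¬ (t < t) := by omega
    rw [if_neg e3, if_neg e4, if_pos rfl, pv_set_map_range]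
    apply pv_map_range_congr
    intro k hk
    by_cases hk1 : k = t
    · subst hk1
      simp [Grow]
    · by_cases hk2 : k = t + 1
      · subst hk2
        simp [Hrow]
      · have h1 : (k < t + 1) ↔ (k < t) := by omega
        simp only [if_neg hk1, if_neg hk2, h1]

-- range conversions (N = n + 1)
theorem pv_toNat (n : Nat) : ((n : Int) + 1 - 1).toNat = n := by omega

theorem pv_range0 (n : Nat) :
    PySem.List.pyRange 0 ((n : Int) + 1 - 1) 1 = (List.range n).map (fun k : Nat => (k : Int)) := by
  rw [PySem.List.pyRange_one]
  have h1 : (((n : Int) + 1 - 1) - 0).toNat = n := by omega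
  rw [h1]
  exact pv_map_range_congr n (fun k _ => by ring)

theorem pv_range0' (n : Nat) :
    PySem.List.pyRange 0 (n : Int) 1 = (List.range n).map (fun k : Nat => (k : Int)) := by
  rw [PySem.List.pyRange_one]
  have h1 : ((n : Int) - 0).toNat = n := by omega
  rw [h1]
  exact pv_map_range_congr n (fun k _ => by ring)

theorem pv_range1 (n : Nat) :
    PySem.List.pyRange 1 ((n : Int) + 1) 1 = (List.range n).map (fun k : Nat => (k : Int) + 1) := by
  rw [PySem.List.pyRange_one]
  have h1 : (((n : Int) + 1) - 1).toNat = n := by omega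
  rw [h1]
  exact pv_map_range_congr n (fun k _ => by ring)

theorem pv_range2 (n : Nat) :
    PySem.List.pyRange 1 ((n : Int) + 1 - 1) 1 = (List.range (n - 1)).map (fun k : Nat => (k : Int) + 1) := by
  rw [PySem.List.pyRange_one]
  have h1 : (((n : Int) + 1 - 1) - 1).toNat = n - 1 := by omega
  rw [h1]
  exact pv_map_range_congr (n - 1) (fun k _ => by ring)

-- index-cast helpers (i = ↑k + 1 after foldl_map)
theorem pv_getD_pred {α : Type} (xs : List α) (k : Nat) (d : α) :
    PySem.List.pyGetD xs ((k : Int) + 1 - 1) d = xs.getD k d := by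
  rw [show ((k : Int) + 1 - 1) = ((k : Nat) : Int) by ring, PySem.List.pyGetD_natCast]

theorem pv_setD_pred {α : Type} (xs : List α) (k : Nat) (v : α) :
    PySem.List.pySetD xs ((k : Int) + 1 - 1) v = xs.set k v := by
  rw [show ((k : Int) + 1 - 1) = ((k : Nat) : Int) by ring, PySem.List.pySetD_natCast]

theorem pv_getD_succ {α : Type} (xs : List α) (k : Nat) (d : α) :
    PySem.List.pyGetD xs ((k : Int) + 1) d = xs.getD (k + 1) d := by
  rw [show ((k : Int) + 1) = ((k + 1 : Nat) : Int) by push_cast; ring, PySem.List.pyGetD_natCast]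

theorem pv_setD_succ {α : Type} (xs : List α) (k : Nat) (v : α) :
    PySem.List.pySetD xs ((k : Int) + 1) v = xs.set (k + 1) v := by
  rw [show ((k : Int) + 1) = ((k + 1 : Nat) : Int) by push_cast; ring, PySem.List.pySetD_natCast]

theorem pv_getD_succ2 (xs : List Int) (k : Nat) (d : Int) :
    PySem.List.pyGetD xs ((k : Int) + 1 + 1) d = xs.getD (k + 2) d := by
  rw [show ((k : Int) + 1 + 1) = ((k + 2 : Nat) : Int) by push_cast; ring, PySem.List.pyGetD_natCast]

-- characterisation of port A for N = ↑n + 1, n ≥ 1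
theorem pv_portA (n : Nat) (hn : 1 ≤ n) (h_ : List Int) :
    create_linear_system ((n : Int) + 1) h_ =
      ((List.range n).map (fun r =>
         if r < n - 1 then Grow n r else if r = n - 1 then Hrow n r else Drow n r),
       (List.range n).map (fun k =>
         if k < n then -(h_.getD k 0) + h_.getD (k + 2) 0 else 0)) := by
  unfold create_linear_system
  simp only [pv_range0, pv_range1, pv_range2, pv_toNat, List.foldl_map, List.map_map,
    Function.comp_def, pv_getD_pred, pv_setD_pred, pv_getD_succ, pv_setD_succ, pv_getD_succ2]
  have hp := pv_foldl_pair
    (fun (A : List (List Int)) (k : Nat) => A.set k ((A.getD k []).set k (-2)))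
    (fun (b : List Int) (k : Nat) => b.set k (-(h_.getD k 0) + h_.getD (k + 2) 0))
    (List.range n) ((List.range n).map (fun _ => List.replicate n (0 : Int)))
    (List.replicate n (0 : Int))
  simp only [] at hp
  rw [hp]
  have hA := pv_foldl_set_self (fun (k : Nat) (row : List Int) => row.set k (-2))
    (fun _ => List.replicate n (0 : Int)) [] n n le_rfl
  simp only [] at hA
  rw [hA, pv_foldl_set_const]
  have hinit : (List.range n).map
      (fun r => if r < n then (List.replicate n (0 : Int)).set r (-2) else List.replicate n (0 : Int))
      = (List.range n).map (fun r => Drow n r) :=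
    pv_map_range_congr n (fun k hk => by simp [Drow, hk])
  rw [hinit, pv_loop2 n (n - 1) (by omega)]

-- characterisation of port B for N = ↑n + 1, n ≥ 1
theorem pv_portB (n : Nat) (hn : 1 ≤ n) (h_ : List Int) :
    create_linear_system_alt ((n : Int) + 1) h_ =
      ((List.range n).map (fun i => Srow n i),
       ((h_.take n).zip ((h_.drop 2).take n)).map (fun p => p.2 - p.1)) := by
  unfold create_linear_system_alt
  have hm : max ((n : Int) + 1 - 1) 0 = (n : Int) := by omega
  simp only [hm, pv_range0', List.map_map, Function.comp_def]
  have hb2 : PySem.List.slice h_ (some (2 : Int)) (some ((n : Int) + 2)) = (h_.drop 2).take n := by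
    rw [show ((n : Int) + 2) = (((2 : Nat) : Int) + ((n : Nat) : Int)) by ring]
    rw [show ((2 : Int)) = (((2 : Nat)) : Int) by norm_num]
    rw [PySem.List.slice_natCast_add]
  have hb1 : PySem.List.slice h_ none (some (n : Int)) = h_.take n :=
    PySem.List.slice_to_natCast h_ n
  rw [hb1, hb2]
  refine congrArg₂ Prod.mk ?_ rfl
  apply pv_map_range_congr
  intro i hi
  have e1 : (n : Int) + 1 - ((i : Nat) : Int) = ((n + 1 - i : Nat) : Int) := by omega
  have e2 : 2 * (n : Int) + 1 - ((i : Nat) : Int)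
      = ((n + 1 - i : Nat) : Int) + ((n : Nat) : Int) := by omega
  rw [e1, e2, PySem.List.slice_natCast_add]
  simp [Srow, Tmpl]

-- the row A's mutations produce equals B's stencil slice
theorem pv_row_eq (n r : Nat) (hr : r < n) :
    (if r < n - 1 then Grow n r else if r = n - 1 then Hrow n r else Drow n r) = Srow n r := by
  have hget : ∀ j, j < n → (Srow n r).getD j 0 =
      (if r = j then (-2 : Int) else if r + 1 = j ∨ j + 1 = r then 1 else 0) := by
    intro j hj
    have hlen : (Srow n r).length = n := pv_len_Srow n r hr
    have hjl : j < (Srow n r).length := by omega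
    rw [List.getD_eq_getElem _ _ hjl]
    unfold Srow
    rw [List.getElem_take, List.getElem_drop]
    have ht : (n + 1 - r) + j < 2 * n + 3 := by omega
    rw [pv_Tmpl_get n ((n + 1 - r) + j) ht]
    split_ifs <;> omega
  have key : ∀ (L : List Int), L.length = n →
      (∀ j, j < n → L.getD j 0 = (if r = j then (-2 : Int) else if r + 1 = j ∨ j + 1 = r then 1 else 0)) →
      L = Srow n r := by
    intro L hL hLg
    apply List.ext_getElem
    · rw [hL, pv_len_Srow n r hr]
    · intro j h1 h2
      have hj : j < n := by omega
      have a1 := hLg j hj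
      have a2 := hget j hj
      rw [List.getD_eq_getElem _ _ h1] at a1
      rw [List.getD_eq_getElem _ _ h2] at a2
      rw [a1, a2]
  rcases Nat.lt_or_ge r (n - 1) with hcase | hcase
  · rw [if_pos hcase]
    apply key
    · exact pv_len_Grow n r
    · intro j hj
      by_cases hr0 : r = 0
      · subst hr0
        have hG : Grow n 0 = ((List.replicate n (0 : Int)).set 0 (-2)).set 1 1 := by
          simp [Grow, Hrow, Drow]
        rw [hG, List.getD_eq_getElem _ _ (by simp; omega)]
        simp only [List.getElem_set, List.getElem_replicate]
        rcases Nat.lt_or_ge j 2 with hj2 | hj2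
        · interval_cases j <;> norm_num
        · have a1 : ¬ (1 = j) := by omega
          have a2 : ¬ (0 = j) := by omega
          simp [a1, a2]
      · rw [show Grow n r = ((Drow n r).set (r - 1) 1).set (r + 1) 1 by simp [Grow, Hrow, hr0]]
        rw [List.getD_eq_getElem _ _ (by simp [Drow]; omega)]
        simp only [Drow, List.getElem_set, List.getElem_replicate]
        split_ifs <;> omega
  · have hreq : r = n - 1 := by omega
    rw [if_neg (by omega), if_pos hreq]
    apply key
    · exact pv_len_Hrow n r
    · intro j hj
      by_cases hr0 : r = 0
      · subst hr0
        have hH : Hrow n 0 = (List.replicate n (0 : Int)).set 0 (-2) := by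
          simp [Hrow, Drow]
        rw [hH, List.getD_eq_getElem _ _ (by simp; omega)]
        simp only [List.getElem_set, List.getElem_replicate]
        split_ifs <;> omega
      · rw [show Hrow n r = (Drow n r).set (r - 1) 1 by simp [Hrow, hr0]]
        rw [List.getD_eq_getElem _ _ (by simp [Drow]; omega)]
        simp only [Drow, List.getElem_set, List.getElem_replicate]
        split_ifs <;> omega

theorem pv_main (n : Nat) (hn : 1 ≤ n) (h_ : List Int) (hlen : n + 2 ≤ h_.length) :
    create_linear_system ((n : Int) + 1) h_ = create_linear_system_alt ((n : Int) + 1) h_ := by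
  rw [pv_portA n hn h_, pv_portB n hn h_]
  simp only [Prod.mk.injEq]
  constructor
  · exact pv_map_range_congr n (fun r hr => pv_row_eq n r hr)
  · have l1 : (h_.take n).length = n := by rw [List.length_take]; omega
    have l2 : ((h_.drop 2).take n).length = n := by
      rw [List.length_take, List.length_drop]; omega
    apply List.ext_getElem
    · simp [l1, l2]
    · intro k h1 h2
      have hk : k < n := by simpa using h1
      simp only [List.getElem_map, List.getElem_range, List.getElem_zip,
        List.getElem_take, List.getElem_drop, if_pos hk]
      rw [List.getD_eq_getElem _ _ (by omega), List.getD_eq_getElem _ _ (by omega)]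
      have : 2 + k = k + 2 := by omega
      simp [this]
      ring

-- ===== VERDICT (by name: the statement is the Claim_ definition above) =====
theorem create_linear_system_spec : Claim_equal_create_linear_system := by
  unfold Claim_equal_create_linear_system Spec_create_linear_system
  intro N h_ _ hpre
  by_cases hN : N ≤ 1
  · have e1 : PySem.List.pyRange 0 (N - 1) 1 = [] := PySem.List.pyRange_one_eq_nil (by omega)
    have e2 : PySem.List.pyRange 1 N 1 = [] := PySem.List.pyRange_one_eq_nil (by omega)
    have e3 : PySem.List.pyRange 1 (N - 1) 1 = [] := PySem.List.pyRange_one_eq_nil (by omega)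
    have e4 : (N - 1).toNat = 0 := by omega
    have hm : max (N - 1) 0 = (0 : Int) := by omega
    have e5 : PySem.List.pyRange 0 (max (N - 1) 0) 1 = [] := by
      rw [hm]; exact PySem.List.pyRange_one_eq_nil (by omega)
    have e6 : PySem.List.slice h_ none (some (max (N - 1) 0)) = [] := by
      rw [hm]; simpa using PySem.List.slice_to_natCast h_ 0
    simp [create_linear_system, create_linear_system_alt, e1, e2, e3, e4, e5, e6]
  · have hlen : N + 1 ≤ (h_.length : Int) := by
      rcases hpre with h | h
      · omega
      · exact h
    have hNn : N = (((N - 1).toNat : Nat) : Int) + 1 := by omega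
    rw [hNn]
    exact pv_main ((N - 1).toNat) (by omega) h_ (by omega)
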